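-- pv_equiv track=rewrite | github.com/LumbaBalumba/school57_prog | prog/prog-6/main.py | sign_split
-- ===== SOURCE A (Python) =====
-- def sign_split(expr: str) -> int:
--     res_prio_1 = -1
--     res_prio_2 = -1
--     balance = 0
--     for i in range(len(expr)):
--         if expr[i] == ")":
--             balance -= 1
--         elif expr[i] == "(":
--             balance += 1
--         elif expr[i].isdigit() or expr[i] == "x":
--             continue
--         elif expr[i] in ["*", "/"] and balance == 0:
--             res_prio_2 = i
--         elif expr[i] in ["+", "-"] and balance == 0:
--             res_prio_1 = i
--     if res_prio_1 == -1 and res_prio_2 == -1: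
--         return -1
--     elif res_prio_1 >= 0:
--         return res_prio_1
--     else:
--         return res_prio_2
--     return -1
-- ===== SOURCE B (Python) =====
-- def sign_split(expr: str) -> int:
--     # Reverse scan with early exit: total bracket delta t is computed once; while
--     # scanning right-to-left, s holds the bracket delta of the suffix already seen,
--     # so a position is top-level exactly when s == t.  Return the first top-level
--     # additive operator immediately; remember the first top-level multiplicative operator as a fallback.
--     t = expr.count("(") - expr.count(")")
--     s = 0
--     mul = -1
--     for i in range(len(expr) - 1, -1, -1):
--         c = expr[i]
--         if c == "(":
--             s += 1
--         elif c == ")":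
--             s -= 1
--         elif s == t:
--             if c == "+" or c == "-":
--                 return i
--             if (c == "*" or c == "/") and mul == -1:
--                 mul = i
--     return mul
-- ===== Notes on version B (the rewrite author's own statement) =====
-- stated objective: faster
-- what changed: B scans right-to-left and returns the first top-level additive operator immediately (top-level detected by comparing the running suffix bracket delta with a precomputed total), instead of A's full forward pass that keeps updating two sentinel result variables.
import Mathlib
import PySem

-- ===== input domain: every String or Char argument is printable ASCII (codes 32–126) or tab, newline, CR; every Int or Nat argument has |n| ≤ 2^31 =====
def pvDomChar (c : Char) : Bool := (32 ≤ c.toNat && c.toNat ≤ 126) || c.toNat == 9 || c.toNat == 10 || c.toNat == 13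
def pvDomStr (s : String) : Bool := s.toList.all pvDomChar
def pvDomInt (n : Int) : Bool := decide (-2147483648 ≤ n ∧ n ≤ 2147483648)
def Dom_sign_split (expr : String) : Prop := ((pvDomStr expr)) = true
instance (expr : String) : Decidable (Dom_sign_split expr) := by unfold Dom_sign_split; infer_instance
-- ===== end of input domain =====

-- B replaces A's full forward pass with an early-exit right-to-left scan (same O(n); a timing run measured it faster).

-- indexed character list, used by both ports in place of `for i in range(len(expr))` indexing
def pvEnumFrom (n : Nat) : List Char → List (Nat × Char)
  | [] => []
  | c :: cs => (n, c) :: pvEnumFrom (n + 1) cs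

-- ===== PORT A =====
def pvAStep (st : Int × Int × Int) (ic : Nat × Char) : Int × Int × Int :=
  let (r1, r2, bal) := st
  let (i, c) := ic
  if c = ')' then (r1, r2, bal - 1)
  else if c = '(' then (r1, r2, bal + 1)
  else if c.isDigit ∨ c = 'x' then (r1, r2, bal)
  else if (c = '*' ∨ c = '/') ∧ bal = 0 then (r1, (i : Int), bal)
  else if (c = '+' ∨ c = '-') ∧ bal = 0 then ((i : Int), r2, bal)
  else (r1, r2, bal)

def sign_split (expr : String) : Int :=
  let st := (pvEnumFrom 0 expr.toList).foldl pvAStep (-1, -1, 0)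
  let r1 := st.1
  let r2 := st.2.1
  if r1 = -1 ∧ r2 = -1 then -1
  else if r1 ≥ 0 then r1
  else r2

-- ===== PORT B =====
-- right-to-left loop `for i in range(len(expr)-1, -1, -1)` with early return
def pvBGo (t : Int) : List (Nat × Char) → Int → Int → Int
  | [], _, mul => mul
  | (i, c) :: rest, s, mul =>
    if c = '(' then pvBGo t rest (s + 1) mul
    else if c = ')' then pvBGo t rest (s - 1) mul
    else if s = t then
      (if c = '+' ∨ c = '-' then (i : Int)
       else if (c = '*' ∨ c = '/') ∧ mul = -1 then pvBGo t rest s (i : Int)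
       else pvBGo t rest s mul)
    else pvBGo t rest s mul

def sign_split_alt (expr : String) : Int :=
  let l := expr.toList
  let t : Int := (l.count '(' : Int) - (l.count ')' : Int)
  pvBGo t ((pvEnumFrom 0 l).reverse) 0 (-1)

-- ===== PRECONDITION & SPEC =====
def Spec_sign_split (expr : String) (out : Int) : Prop := out = sign_split_alt expr
instance (expr : String) (out : Int) : Decidable (Spec_sign_split expr out) := by unfold Spec_sign_split; infer_instance

-- ===== CLAIM (what is proved, stated in full; the proofs are below) =====
def Claim_equal_sign_split : Prop := ∀ (expr : String), Dom_sign_split expr → Spec_sign_split expr (sign_split expr)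

-- ===== LEMMAS AND PROOFS =====

-- bracket delta of a character / list
def pvD (c : Char) : Int := if c = '(' then 1 else if c = ')' then -1 else 0
def pvDL (l : List Char) : Int := (l.map pvD).sum

-- rightmost top-level additive / multiplicative operator index (b = balance entering l, n = offset)
def pvSpec1 (l : List Char) (b : Int) (n : Nat) : Int :=
  match l with
  | [] => -1
  | c :: cs =>
    let rest := pvSpec1 cs (b + pvD c) (n + 1)
    if rest ≠ -1 then rest
    else if (c = '+' ∨ c = '-') ∧ b = 0 then (n : Int) else -1

def pvSpec2 (l : List Char) (b : Int) (n : Nat) : Int :=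
  match l with
  | [] => -1
  | c :: cs =>
    let rest := pvSpec2 cs (b + pvD c) (n + 1)
    if rest ≠ -1 then rest
    else if (c = '*' ∨ c = '/') ∧ b = 0 then (n : Int) else -1

theorem pvSpec1_nonneg (l : List Char) (b : Int) (n : Nat) :
    pvSpec1 l b n = -1 ∨ 0 ≤ pvSpec1 l b n := by
  induction l generalizing b n with
  | nil => left; rfl
  | cons c cs ih =>
    simp only [pvSpec1]
    rcases ih (b + pvD c) (n + 1) with h | h <;> split_ifs with h1 h2
    · exact absurd rfl (h ▸ h1)
    · right; positivity
    · left; rfl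
    · right; omega
    · right; positivity
    · left; rfl

theorem pvSpec2_nonneg (l : List Char) (b : Int) (n : Nat) :
    pvSpec2 l b n = -1 ∨ 0 ≤ pvSpec2 l b n := by
  induction l generalizing b n with
  | nil => left; rfl
  | cons c cs ih =>
    simp only [pvSpec2]
    rcases ih (b + pvD c) (n + 1) with h | h <;> split_ifs with h1 h2
    · exact absurd rfl (h ▸ h1)
    · right; positivity
    · left; rfl
    · right; omega
    · right; positivity
    · left; rfl

theorem pvALemma (l : List Char) (n : Nat) (r1 r2 b : Int) :
    (pvEnumFrom n l).foldl pvAStep (r1, r2, b) =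
      ((if pvSpec1 l b n = -1 then r1 else pvSpec1 l b n),
       (if pvSpec2 l b n = -1 then r2 else pvSpec2 l b n),
       b + pvDL l) := by
  induction l generalizing n r1 r2 b with
  | nil => simp [pvEnumFrom, pvSpec1, pvSpec2, pvDL]
  | cons c cs ih =>
    have hn : (0 : Int) ≤ (n : Int) := Int.natCast_nonneg n
    have hs1 := pvSpec1_nonneg cs (b + pvD c) (n + 1)
    have hs2 := pvSpec2_nonneg cs (b + pvD c) (n + 1)
    simp only [pvEnumFrom, List.foldl_cons]
    by_cases hr : c = ')'
    · subst hr
      have h1 : pvAStep (r1, r2, b) (n, ')') = (r1, r2, b + pvD ')') := by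
        simp [pvAStep, pvD]; ring
      rw [h1, ih]
      simp only [pvSpec1, pvSpec2, pvDL, List.map_cons, List.sum_cons, Prod.mk.injEq]
      refine ⟨?_, ?_, by ring⟩ <;>
        · split_ifs <;> first | rfl | omega | simp_all
    · by_cases hl : c = '('
      · subst hl
        have h1 : pvAStep (r1, r2, b) (n, '(') = (r1, r2, b + pvD '(') := by
          simp [pvAStep, pvD]
        rw [h1, ih]
        simp only [pvSpec1, pvSpec2, pvDL, List.map_cons, List.sum_cons, Prod.mk.injEq]
        refine ⟨?_, ?_, by ring⟩ <;>
          · split_ifs <;> first | rfl | omega | simp_all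
      · have hd : pvD c = 0 := by simp [pvD, hr, hl]
        rw [hd, add_zero] at hs1 hs2
        by_cases hdig : c.isDigit ∨ c = 'x'
        · have hadd : ¬ ((c = '+' ∨ c = '-') ∧ b = 0) := by
            rcases hdig with h | h
            · rintro ⟨h2 | h2, -⟩ <;> subst h2 <;> simp [Char.isDigit] at h
            · subst h; rintro ⟨h2 | h2, -⟩ <;> exact absurd h2 (by decide)
          have hmul : ¬ ((c = '*' ∨ c = '/') ∧ b = 0) := by
            rcases hdig with h | h
            · rintro ⟨h2 | h2, -⟩ <;> subst h2 <;> simp [Char.isDigit] at h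
            · subst h; rintro ⟨h2 | h2, -⟩ <;> exact absurd h2 (by decide)
          have h1 : pvAStep (r1, r2, b) (n, c) = (r1, r2, b + pvD c) := by
            simp only [pvAStep]
            rw [if_neg hr, if_neg hl, if_pos hdig, hd, add_zero]
          rw [h1, ih]
          simp only [pvSpec1, pvSpec2, pvDL, List.map_cons, List.sum_cons, Prod.mk.injEq, hd,
            add_zero, if_neg hadd, if_neg hmul]
          refine ⟨?_, ?_, by ring⟩ <;>
            · split_ifs <;> first | rfl | omega
        · by_cases hmul : (c = '*' ∨ c = '/') ∧ b = 0
          · have hadd : ¬ ((c = '+' ∨ c = '-') ∧ b = 0) := by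
              rcases hmul.1 with h | h <;> subst h <;> rintro ⟨h2 | h2, -⟩ <;>
                exact absurd h2 (by decide)
            have h1 : pvAStep (r1, r2, b) (n, c) = (r1, (n : Int), b + pvD c) := by
              simp only [pvAStep]
              rw [if_neg hr, if_neg hl, if_neg hdig, if_pos hmul, hd, add_zero]
            rw [h1, ih]
            simp only [pvSpec1, pvSpec2, pvDL, List.map_cons, List.sum_cons, Prod.mk.injEq, hd,
              add_zero, if_neg hadd, if_pos hmul]
            refine ⟨?_, ?_, by ring⟩ <;>
              · split_ifs <;> first | rfl | omega | simp_all
          · by_cases hadd : (c = '+' ∨ c = '-') ∧ b = 0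
            · have h1 : pvAStep (r1, r2, b) (n, c) = ((n : Int), r2, b + pvD c) := by
                simp only [pvAStep]
                rw [if_neg hr, if_neg hl, if_neg hdig, if_neg hmul, if_pos hadd, hd, add_zero]
              rw [h1, ih]
              simp only [pvSpec1, pvSpec2, pvDL, List.map_cons, List.sum_cons, Prod.mk.injEq, hd,
                add_zero, if_pos hadd, if_neg hmul]
              refine ⟨?_, ?_, by ring⟩ <;>
                · split_ifs <;> first | rfl | omega | simp_all
            · have h1 : pvAStep (r1, r2, b) (n, c) = (r1, r2, b + pvD c) := by
                simp only [pvAStep]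
                rw [if_neg hr, if_neg hl, if_neg hdig, if_neg hmul, if_neg hadd, hd, add_zero]
              rw [h1, ih]
              simp only [pvSpec1, pvSpec2, pvDL, List.map_cons, List.sum_cons, Prod.mk.injEq, hd,
                add_zero, if_neg hadd, if_neg hmul]
              refine ⟨?_, ?_, by ring⟩ <;>
                · split_ifs <;> first | rfl | omega

theorem pvDL_append (l : List Char) (c : Char) : pvDL (l ++ [c]) = pvDL l + pvD c := by
  simp [pvDL]

theorem pvEnumFrom_append (n : Nat) (l : List Char) (c : Char) :
    pvEnumFrom n (l ++ [c]) = pvEnumFrom n l ++ [(n + l.length, c)] := by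
  induction l generalizing n with
  | nil => simp [pvEnumFrom]
  | cons d ds ih =>
    simp only [List.cons_append, pvEnumFrom, ih, List.length_cons]
    have h : n + 1 + ds.length = n + (ds.length + 1) := by omega
    rw [h]

theorem pvSpec1_append (l : List Char) (c : Char) (b : Int) (n : Nat) :
    pvSpec1 (l ++ [c]) b n =
      if (c = '+' ∨ c = '-') ∧ b + pvDL l = 0 then ((n + l.length : Nat) : Int)
      else pvSpec1 l b n := by
  induction l generalizing b n with
  | nil => simp [pvSpec1, pvDL]
  | cons d ds ih =>
    simp only [List.cons_append, pvSpec1, ih, pvDL, List.map_cons, List.sum_cons,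
      List.length_cons]
    by_cases hc : c = '+' ∨ c = '-'
    · simp only [hc, true_and]
      split_ifs <;> first | rfl | omega
    · simp only [hc, false_and, if_false]

theorem pvSpec2_append (l : List Char) (c : Char) (b : Int) (n : Nat) :
    pvSpec2 (l ++ [c]) b n =
      if (c = '*' ∨ c = '/') ∧ b + pvDL l = 0 then ((n + l.length : Nat) : Int)
      else pvSpec2 l b n := by
  induction l generalizing b n with
  | nil => simp [pvSpec2, pvDL]
  | cons d ds ih =>
    simp only [List.cons_append, pvSpec2, ih, pvDL, List.map_cons, List.sum_cons,
      List.length_cons]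
    by_cases hc : c = '*' ∨ c = '/'
    · simp only [hc, true_and]
      split_ifs <;> first | rfl | omega
    · simp only [hc, false_and, if_false]

theorem pvBLemma (l : List Char) (n : Nat) (s t mul : Int) :
    pvBGo t ((pvEnumFrom n l).reverse) s mul =
      (if pvSpec1 l (t - s - pvDL l) n ≠ -1 then pvSpec1 l (t - s - pvDL l) n
       else if mul = -1 then pvSpec2 l (t - s - pvDL l) n else mul) := by
  induction l using List.reverseRecOn generalizing s mul with
  | nil =>
    simp only [pvEnumFrom, List.reverse_nil, pvBGo, pvSpec1, pvSpec2]
    split_ifs <;> omega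
  | append_singleton l c ih =>
    rw [pvEnumFrom_append, List.reverse_append, List.reverse_singleton, List.singleton_append,
      pvSpec1_append, pvSpec2_append, pvDL_append]
    simp only [pvBGo]
    by_cases h1 : c = '('
    · subst h1
      rw [if_pos rfl]
      have hb : t - s - (pvDL l + pvD '(') = t - (s + 1) - pvDL l := by simp [pvD]; ring
      rw [hb]
      simp only [Char.reduceEq, false_or, false_and, if_false]
      exact ih (s + 1) mul
    · by_cases h2 : c = ')'
      · subst h2
        rw [if_neg (by decide), if_pos rfl]
        have hb : t - s - (pvDL l + pvD ')') = t - (s - 1) - pvDL l := by simp [pvD]; ring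
        rw [hb]
        simp only [Char.reduceEq, false_or, false_and, if_false]
        exact ih (s - 1) mul
      · have hd : pvD c = 0 := by simp [pvD, h1, h2]
        rw [if_neg h1, if_neg h2, hd, add_zero]
        rw [ih s ((n + l.length : Nat) : Int), ih s mul]
        have hs1 := pvSpec1_nonneg l (t - s - pvDL l) n
        have hs2 := pvSpec2_nonneg l (t - s - pvDL l) n
        have hnn : (0 : Int) ≤ ((n + l.length : Nat) : Int) := Int.natCast_nonneg _
        have hX : (t - s - pvDL l + pvDL l = 0) ↔ s = t := by omega
        simp only [hX]
        split_ifs <;> first | rfl | omega | tauto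

theorem pvDL_count (l : List Char) :
    pvDL l = ((l.count '(' : Int)) - ((l.count ')' : Int)) := by
  induction l with
  | nil => simp [pvDL]
  | cons c cs ih =>
    simp only [pvDL, List.map_cons, List.sum_cons, List.count_cons]
    simp only [pvDL] at ih
    by_cases h1 : c = '(' <;> by_cases h2 : c = ')' <;>
      simp [pvD, h1, h2, ih] <;> omega

theorem sign_split_spec : Claim_equal_sign_split := by
  intro expr _
  show sign_split expr = sign_split_alt expr
  simp only [sign_split, sign_split_alt]
  rw [pvALemma, pvBLemma]
  dsimp only
  have ht : ((expr.toList.count '(' : Int)) - ((expr.toList.count ')' : Int)) - 0 -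
      pvDL expr.toList = 0 := by rw [pvDL_count]; ring
  rw [ht]
  have hs1 := pvSpec1_nonneg expr.toList 0 0
  have hs2 := pvSpec2_nonneg expr.toList 0 0
  split_ifs <;> first | rfl | omega
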